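-- pv_equiv track=rewrite | github.com/me-odo/spotify-auto-playlists | app/pipeline/playlist_manager.py | _merge_target_playlists
-- ===== SOURCE A (Python) =====
-- from typing import Any, Dict, List, Tuple
--
-- def _merge_target_playlists(
--     playlists_mood: Dict[str, List[str]],
--     playlists_genre: Dict[str, List[str]],
--     playlists_year: Dict[str, List[str]],
-- ) -> Dict[str, List[str]]:
--     """
--     Merge mood/genre/year target playlists into a single mapping.
--
--     The merge preserves the order of track IDs and avoids duplicates
--     within each playlist.
--     """
--     target_playlists: Dict[str, List[str]] = {}
--     for source in (playlists_mood, playlists_genre, playlists_year):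
--         for name, ids in source.items():
--             bucket = target_playlists.setdefault(name, [])
--             for tid in ids:
--                 if tid not in bucket:
--                     bucket.append(tid)
--     return target_playlists
-- ===== SOURCE B (Python) =====
-- def _merge_target_playlists(playlists_mood, playlists_genre, playlists_year):
--     # Gather the playlist names in first-occurrence order, then for each name
--     # collect its ids from all three sources and dedup once, order-preserving.
--     sources = (playlists_mood, playlists_genre, playlists_year)
--     names = list(dict.fromkeys(n for s in sources for n in s))
--     return {
--         name: list(dict.fromkeys(t for s in sources for t in s.get(name, ())))
--         for name in names
--     }
-- ===== Notes on version B (the rewrite author's own statement) =====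
-- stated objective: alternative
-- what changed: A does one fused pass over all entries, mutating per-name buckets with a membership test per id; B first computes the name list in first-occurrence order, then builds each playlist independently by looking up that name in all three sources, concatenating and deduplicating once with dict.fromkeys.
import Mathlib
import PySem

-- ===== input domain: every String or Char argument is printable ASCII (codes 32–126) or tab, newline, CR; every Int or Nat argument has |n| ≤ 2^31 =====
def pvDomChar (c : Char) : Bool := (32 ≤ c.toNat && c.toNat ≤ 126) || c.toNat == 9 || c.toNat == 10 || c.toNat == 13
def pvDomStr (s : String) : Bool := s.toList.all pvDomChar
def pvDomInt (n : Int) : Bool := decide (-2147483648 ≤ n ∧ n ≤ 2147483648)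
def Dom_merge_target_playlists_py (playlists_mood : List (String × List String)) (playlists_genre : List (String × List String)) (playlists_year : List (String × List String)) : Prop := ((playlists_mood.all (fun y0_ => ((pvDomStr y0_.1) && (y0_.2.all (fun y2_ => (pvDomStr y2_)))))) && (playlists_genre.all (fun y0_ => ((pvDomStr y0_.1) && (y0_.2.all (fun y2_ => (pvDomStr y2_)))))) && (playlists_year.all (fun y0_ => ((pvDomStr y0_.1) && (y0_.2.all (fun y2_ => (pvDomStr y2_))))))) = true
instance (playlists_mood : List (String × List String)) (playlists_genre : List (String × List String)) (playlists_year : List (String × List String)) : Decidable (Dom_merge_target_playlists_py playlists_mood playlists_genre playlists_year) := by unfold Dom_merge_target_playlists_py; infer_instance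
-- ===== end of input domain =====

-- B replaces A's fused mutate-per-entry merge by a name-directed gather: compute the
-- name list first, then build each playlist by looking the name up in all three sources
-- and deduplicating the concatenation once; same return value, a different decomposition.


-- ===== PORT A =====
-- one (name, ids) iteration of A: bucket = target.setdefault(name, []); for tid in ids: if tid not in bucket: bucket.append(tid)
def pvStepA (d : PySem.Dict String (List String)) (p : String × List String) : PySem.Dict String (List String) :=
  let d1 := d.setdefault p.1 []
  let bucket := d1.getD p.1 []
  d1.insert p.1 (p.2.foldl (fun b t => if b.contains t then b else b ++ [t]) bucket)

def merge_target_playlists_py (playlists_mood : List (String × List String)) (playlists_genre : List (String × List String)) (playlists_year : List (String × List String)) : List (String × List String) :=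
  (List.foldl pvStepA (List.foldl pvStepA (List.foldl pvStepA PySem.Dict.empty playlists_mood) playlists_genre) playlists_year).items

-- ===== PORT B =====
-- s.get(name, ()) on the source dict (first-match lookup), defaulting to the empty sequence
def pvGet (s : List (String × List String)) (name : String) : List String :=
  ((PySem.Dict.mk s).get? name).getD []

def merge_target_playlists_py_alt (playlists_mood : List (String × List String)) (playlists_genre : List (String × List String)) (playlists_year : List (String × List String)) : List (String × List String) :=
  let sources := [playlists_mood, playlists_genre, playlists_year]
  -- names = list(dict.fromkeys(n for s in sources for n in s))
  let names := PySem.List.dedup (sources.flatMap (fun s => s.map Prod.fst))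
  -- {name: list(dict.fromkeys(t for s in sources for t in s.get(name, ()))) for name in names}
  names.map (fun name => (name, PySem.List.dedup (sources.flatMap (fun s => pvGet s name))))

-- ===== PRECONDITION & SPEC =====
-- Pre_ only states dict well-formedness: each source, being a Python dict, has pairwise
-- distinct keys; it excludes no input the Python function accepts.
def Pre_merge_target_playlists_py (playlists_mood : List (String × List String)) (playlists_genre : List (String × List String)) (playlists_year : List (String × List String)) : Prop :=
  (playlists_mood.map Prod.fst).Nodup ∧ (playlists_genre.map Prod.fst).Nodup ∧ (playlists_year.map Prod.fst).Nodup
instance (playlists_mood : List (String × List String)) (playlists_genre : List (String × List String)) (playlists_year : List (String × List String)) : Decidable (Pre_merge_target_playlists_py playlists_mood playlists_genre playlists_year) := by unfold Pre_merge_target_playlists_py; infer_instance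

def pvWitness_merge_target_playlists_py : (List (String × List String)) × (List (String × List String)) × (List (String × List String)) :=
  ([("chill", ["a", "b"])], [("chill", ["b", "c"]), ("rock", ["a"])], [("rock", ["a", "d"])])

def Spec_merge_target_playlists_py (playlists_mood : List (String × List String)) (playlists_genre : List (String × List String)) (playlists_year : List (String × List String)) (out : List (String × List String)) : Prop := out = merge_target_playlists_py_alt playlists_mood playlists_genre playlists_year
instance (playlists_mood : List (String × List String)) (playlists_genre : List (String × List String)) (playlists_year : List (String × List String)) (out : List (String × List String)) : Decidable (Spec_merge_target_playlists_py playlists_mood playlists_genre playlists_year out) := by unfold Spec_merge_target_playlists_py; infer_instance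

-- ===== CLAIM (what is proved, stated in full; the proofs are below) =====
def Claim_equal_merge_target_playlists_py : Prop := ∀ (playlists_mood : List (String × List String)) (playlists_genre : List (String × List String)) (playlists_year : List (String × List String)), Dom_merge_target_playlists_py playlists_mood playlists_genre playlists_year → Pre_merge_target_playlists_py playlists_mood playlists_genre playlists_year → Spec_merge_target_playlists_py playlists_mood playlists_genre playlists_year (merge_target_playlists_py playlists_mood playlists_genre playlists_year)

-- ===== LEMMAS AND PROOFS =====

-- the values each name collects from the concatenated entry list
def pvGather (l : List (String × List String)) (n : String) : List String :=
  l.flatMap (fun p => if p.1 == n then p.2 else [])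

-- A's step is a single insert
theorem pvStepA_eq (d : PySem.Dict String (List String)) (p : String × List String) :
    pvStepA d p
      = d.insert p.1 (p.2.foldl (fun b t => if b.contains t then b else b ++ [t]) (d.getD p.1 [])) := by
  by_cases h : d.contains p.1 = true
  · simp only [pvStepA, PySem.Dict.setdefault_of_contains _ _ h]
  · have h' : d.contains p.1 = false := by simpa using h
    simp only [pvStepA, PySem.Dict.setdefault_of_not_contains _ _ h', PySem.Dict.getD_insert_self,
      PySem.Dict.insert_insert_self, PySem.Dict.getD_of_not_contains _ _ h']

-- dedup is the very fold A's inner loop runs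
theorem pv_dedup_append (l ids : List String) :
    PySem.List.dedup (l ++ ids)
      = ids.foldl (fun b t => if b.contains t then b else b ++ [t]) (PySem.List.dedup l) := by
  rw [PySem.List.dedup, PySem.List.dedup, PySem.Set.ofList, PySem.Set.ofList, List.foldl_append]
  rfl

-- key invariant of A's fold
theorem pv_keys_foldA (l : List (String × List String)) :
    (List.foldl pvStepA PySem.Dict.empty l).keys = PySem.List.dedup (l.map Prod.fst) := by
  simp only [PySem.List.dedup_eq_ofList]
  induction l using List.reverseRecOn with
  | nil => rfl
  | append_singleton l p ih =>
    rw [List.foldl_append, List.foldl_cons, List.foldl_nil, pvStepA_eq, List.map_append,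
      List.map_cons, List.map_nil, PySem.Set.ofList_append_singleton, ← ih, PySem.Set.add_eq_ite]
    by_cases h : p.1 ∈ (List.foldl pvStepA PySem.Dict.empty l).keys
    · rw [if_pos h, PySem.Dict.keys_insert_of_contains]
      rw [PySem.Dict.contains_eq_decide_mem_keys]; simpa using h
    · rw [if_neg h, PySem.Dict.keys_insert_of_not_contains]
      rw [PySem.Dict.contains_eq_decide_mem_keys]; simpa using h

-- value invariant of A's fold
theorem pv_getD_foldA (l : List (String × List String)) (n : String) :
    (List.foldl pvStepA PySem.Dict.empty l).getD n [] = PySem.List.dedup (pvGather l n) := by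
  induction l using List.reverseRecOn with
  | nil => rfl
  | append_singleton l p ih =>
    rw [List.foldl_append, List.foldl_cons, List.foldl_nil, pvStepA_eq]
    by_cases h : n = p.1
    · subst h
      rw [PySem.Dict.getD_insert_self, ih, ← pv_dedup_append]
      simp [pvGather]
    · rw [PySem.Dict.getD_insert, if_neg h, ih]
      have hb : p.1 ≠ n := Ne.symm h
      simp [pvGather, hb]

-- with unique keys, first-match lookup gathers exactly the entries at that name
theorem pvGet_eq (s : List (String × List String)) (h : (s.map Prod.fst).Nodup) (n : String) :
    pvGet s n = pvGather s n := by
  induction s with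
  | nil => rfl
  | cons q rest ih =>
    obtain ⟨a, v⟩ := q
    rw [List.map_cons] at h
    obtain ⟨hq, hrest⟩ := List.nodup_cons.mp h
    show ((PySem.Dict.mk ((a, v) :: rest)).get? n).getD [] = _
    rw [PySem.Dict.get?_mk_cons]
    by_cases he : (a == n) = true
    · have han : a = n := by simpa using he
      have hnil : rest.flatMap (fun p => if p.1 = n then p.2 else ([] : List String)) = [] := by
        apply List.flatMap_eq_nil_iff.mpr
        intro p hp
        have hne : p.1 ≠ n := fun hpe => hq (List.mem_map.mpr ⟨p, hp, hpe.trans han.symm⟩)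
        simp [hne]
      rw [if_pos he]
      simp [pvGather, han, hnil]
    · have hne : a ≠ n := by simpa using he
      rw [if_neg he]
      simpa [pvGet, pvGather, hne] using ih hrest

-- ===== VERDICT (by name: the statement is the Claim_ definition above) =====
theorem merge_target_playlists_py_spec : Claim_equal_merge_target_playlists_py := by
  intro m g y _ hpre
  obtain ⟨hm, hg, hy⟩ := hpre
  show merge_target_playlists_py m g y = merge_target_playlists_py_alt m g y
  have key : ∀ (l : List (String × List String)),
      (List.foldl pvStepA PySem.Dict.empty l).items
        = (PySem.List.dedup (l.map Prod.fst)).map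
            (fun n => (n, PySem.List.dedup (pvGather l n))) := by
    intro l
    rw [PySem.Dict.items_eq_map_keys _
        (by rw [pv_keys_foldA]; simp only [PySem.List.dedup_eq_ofList]
            exact PySem.Set.nodup_ofList _) ([] : List String), pv_keys_foldA]
    exact List.map_congr_left fun n _ => by rw [pv_getD_foldA]
  unfold merge_target_playlists_py merge_target_playlists_py_alt
  rw [← List.foldl_append, ← List.foldl_append, key]
  simp only [List.flatMap_cons, List.flatMap_nil, List.append_nil, List.map_append]
  apply List.map_congr_left
  intro n _
  rw [pvGet_eq m hm n, pvGet_eq g hg n, pvGet_eq y hy n]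
  simp [pvGather, List.flatMap_append]
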